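-- pv_equiv track=rewrite | github.com/gurkslask/UniviewSigGrpMaker | main.py | find_intervals_in_variables
-- ===== SOURCE A (Python) =====
-- from collections import defaultdict, namedtuple
--
-- adress_register = namedtuple('adress_register', ['UV_adress', 'length'])
--
-- def find_intervals_in_variables(dict_with_variable):
--     '''
--     Make a variable list
--     '''
--     for variables in dict_with_variable:
--         dict_with_variable[variables].sort()
--         interval = 32
--         last_variable = dict_with_variable[variables][0]
--         first_number = dict_with_variable[variables][0]
--         resulting_list = []
--         length = 1
--         for variable in dict_with_variable[variables]:
--             if variable - last_variable > interval:
--                 # If interval is big enough, add it to the list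
--                 resulting_list.append(adress_register(
--                     first_number,
--                     make_div_by_sixteen(last_variable - first_number)
--                     ))
--                 first_number = variable
--                 length = 0
--             last_variable = variable
--             length += 1
--         # Add the trailing last numbers too
--         resulting_list.append(adress_register(
--             first_number,
--             make_div_by_sixteen(last_variable - first_number)
--             ))
--         dict_with_variable[variables] = resulting_list
--     return dict_with_variable
--
-- def make_div_by_sixteen(an_int):
--     temp_int = 0
--     while an_int > temp_int:
--         temp_int += 16
--     return max(temp_int, 16)
-- ===== SOURCE B (Python) =====
-- from collections import namedtuple
--
-- adress_register = namedtuple('adress_register', ['UV_adress', 'length'])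
--
--
-- def _pad_to_sixteen(an_int):
--     """Smallest positive multiple of 16 that is >= an_int (closed form)."""
--     return max(16, an_int + (-an_int) % 16)
--
--
-- def find_intervals_in_variables(dict_with_variable):
--     '''
--     Make a variable list
--     '''
--     for key in dict_with_variable:
--         dict_with_variable[key].sort()
--         nums = dict_with_variable[key]
--         # pass 1: partition the sorted numbers into runs (start, end),
--         # breaking whenever the gap to the previous number exceeds 32
--         runs = []
--         start = prev = nums[0]
--         for cur in nums[1:]:
--             if cur - prev > 32:
--                 runs.append((start, prev))
--                 start = cur
--             prev = cur
--         runs.append((start, prev))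
--         # pass 2: map each run to its register with a padded length
--         dict_with_variable[key] = [
--             adress_register(s, _pad_to_sixteen(e - s)) for s, e in runs
--         ]
--     return dict_with_variable
-- ===== Notes on version B (the rewrite author's own statement) =====
-- stated objective: alternative
-- what changed: B splits the work into two passes -- first collect the (start,end) run boundaries of the sorted list, then map each run to its register -- and replaces the counting while-loop make_div_by_sixteen with the closed-form max(16, d + (-d) % 16); the unused length counter is dropped.
import Mathlib
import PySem

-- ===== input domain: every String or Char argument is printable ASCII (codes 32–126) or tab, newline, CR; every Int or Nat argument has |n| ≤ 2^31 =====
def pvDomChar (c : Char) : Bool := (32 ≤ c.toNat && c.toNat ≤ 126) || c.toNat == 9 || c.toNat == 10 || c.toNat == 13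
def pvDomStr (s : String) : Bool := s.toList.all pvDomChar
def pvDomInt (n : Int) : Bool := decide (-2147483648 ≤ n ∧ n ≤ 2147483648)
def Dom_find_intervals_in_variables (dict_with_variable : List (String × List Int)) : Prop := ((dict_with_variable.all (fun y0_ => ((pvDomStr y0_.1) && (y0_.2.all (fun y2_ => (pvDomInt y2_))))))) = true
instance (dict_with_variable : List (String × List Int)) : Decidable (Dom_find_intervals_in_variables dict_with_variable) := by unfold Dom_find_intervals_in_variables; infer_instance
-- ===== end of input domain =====

-- B: two-pass decomposition (collect (start,end) runs of the sorted list, then map to registers)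
-- with closed-form padding instead of A's counting while-loop; equivalence is about the RETURN
-- value only (both Pythons also sort the lists and mutate the dict in place, identically).


-- ===== PORT A =====
-- while an_int > temp_int: temp_int += 16;  return max(temp_int, 16)
def mdbsLoop (an_int temp_int : Int) : Int :=
  if an_int > temp_int then mdbsLoop an_int (temp_int + 16) else max temp_int 16
termination_by (an_int - temp_int).toNat
decreasing_by omega

def make_div_by_sixteen (an_int : Int) : Int := mdbsLoop an_int 0

-- state = (last_variable, first_number, resulting_list, length)
def stepA (st : Int × Int × List (Int × Int) × Int) (variable_ : Int) :
    Int × Int × List (Int × Int) × Int :=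
  if variable_ - st.1 > 32 then
    (variable_, variable_, st.2.2.1 ++ [(st.2.1, make_div_by_sixteen (st.1 - st.2.1))], 0 + 1)
  else
    (variable_, st.2.1, st.2.2.1, st.2.2.2 + 1)

def procA (v : List Int) : List (Int × Int) :=
  match PySem.List.sorted v (fun a => a) false with
  | [] => []  -- Python raises IndexError here (excluded by Pre_)
  | x :: rest =>
    let st := List.foldl stepA (x, x, ([] : List (Int × Int)), (1 : Int)) (x :: rest)
    st.2.2.1 ++ [(st.2.1, make_div_by_sixteen (st.1 - st.2.1))]

def find_intervals_in_variables (dict_with_variable : List (String × List Int)) :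
    List (String × List (Int × Int)) :=
  dict_with_variable.map (fun kv => (kv.1, procA kv.2))

-- ===== PORT B =====
-- closed form: max(16, an_int + (-an_int) % 16)
def pad_to_sixteen (an_int : Int) : Int := max 16 (an_int + PySem.Int.mod (-an_int) 16)

-- state = (runs, start, prev)
def stepB (st : List (Int × Int) × Int × Int) (cur : Int) : List (Int × Int) × Int × Int :=
  if cur - st.2.2 > 32 then (st.1 ++ [(st.2.1, st.2.2)], cur, cur)
  else (st.1, st.2.1, cur)

def procB (v : List Int) : List (Int × Int) :=
  match PySem.List.sorted v (fun a => a) false with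
  | [] => []  -- Python raises IndexError here (excluded by Pre_)
  | x :: rest =>
    let st := List.foldl stepB (([] : List (Int × Int)), x, x) rest
    (st.1 ++ [(st.2.1, st.2.2)]).map (fun r => (r.1, pad_to_sixteen (r.2 - r.1)))

def find_intervals_in_variables_alt (dict_with_variable : List (String × List Int)) :
    List (String × List (Int × Int)) :=
  dict_with_variable.map (fun kv => (kv.1, procB kv.2))

-- ===== PRECONDITION & SPEC =====
-- Pre_ excludes dicts with an empty value list: there Python A raises IndexError
-- (dict_with_variable[variables][0]) and Python B raises IndexError too (nums[0]).
def Pre_find_intervals_in_variables (dict_with_variable : List (String × List Int)) : Prop :=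
  ∀ kv ∈ dict_with_variable, kv.2 ≠ []
instance (dict_with_variable : List (String × List Int)) : Decidable (Pre_find_intervals_in_variables dict_with_variable) := by unfold Pre_find_intervals_in_variables; infer_instance

def pvWitness_find_intervals_in_variables : (List (String × List Int)) :=
  [("a", [100, 1, 40]), ("b", [5])]

def Spec_find_intervals_in_variables (dict_with_variable : List (String × List Int)) (out : List (String × List (Int × Int))) : Prop := out = find_intervals_in_variables_alt dict_with_variable
instance (dict_with_variable : List (String × List Int)) (out : List (String × List (Int × Int))) : Decidable (Spec_find_intervals_in_variables dict_with_variable out) := by unfold Spec_find_intervals_in_variables; infer_instance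

-- ===== CLAIM (what is proved, stated in full; the proofs are below) =====
def Claim_equal_find_intervals_in_variables : Prop := ∀ (dict_with_variable : List (String × List Int)), Dom_find_intervals_in_variables dict_with_variable → Pre_find_intervals_in_variables dict_with_variable → Spec_find_intervals_in_variables dict_with_variable (find_intervals_in_variables dict_with_variable)

-- ===== LEMMAS AND PROOFS =====

-- A's counting loop, characterised (t a multiple of 16, nonnegative, as at the call site)
theorem mdbsLoop_eq (a t : Int) (h16 : t % 16 = 0) (h0 : 0 ≤ t) :
    mdbsLoop a t = if a ≤ t then max t 16 else max 16 (a + (-a) % 16) := by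
  rw [mdbsLoop]
  by_cases h : a > t
  · rw [if_pos h, mdbsLoop_eq a (t + 16) (by omega) (by omega),
      if_neg (show ¬a ≤ t by omega)]
    split_ifs with h2
    · omega
    · rfl
  · rw [if_neg h, if_pos (by omega)]
termination_by (a - t).toNat
decreasing_by omega

theorem mdbs_eq_pad (a : Int) : make_div_by_sixteen a = pad_to_sixteen a := by
  unfold make_div_by_sixteen pad_to_sixteen
  rw [mdbsLoop_eq a 0 rfl le_rfl, PySem.Int.mod_eq_emod_of_pos (by norm_num)]
  split_ifs with h
  · omega
  · rfl

def runReg (r : Int × Int) : Int × Int := (r.1, pad_to_sixteen (r.2 - r.1))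

def finishA (st : Int × Int × List (Int × Int) × Int) : List (Int × Int) :=
  st.2.2.1 ++ [(st.2.1, make_div_by_sixteen (st.1 - st.2.1))]

def finishB (st : List (Int × Int) × Int × Int) : List (Int × Int) :=
  st.1 ++ [(st.2.1, st.2.2)]

theorem loop_eq (vs : List Int) :
    ∀ (last first : Int) (resA : List (Int × Int)) (len : Int) (resB : List (Int × Int)),
      resA = resB.map runReg →
      finishA (List.foldl stepA (last, first, resA, len) vs)
      = (finishB (List.foldl stepB (resB, first, last) vs)).map runReg := by
  induction vs with
  | nil =>
    intro last first resA len resB h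
    simp [finishA, finishB, h, runReg, mdbs_eq_pad]
  | cons v vs ih =>
    intro last first resA len resB h
    simp only [List.foldl_cons, stepA, stepB]
    by_cases hgt : v - last > 32
    · rw [if_pos hgt, if_pos hgt]
      exact ih v v _ (0 + 1) (resB ++ [(first, last)])
        (by simp [h, runReg, mdbs_eq_pad])
    · rw [if_neg hgt, if_neg hgt]
      exact ih v first resA (len + 1) resB h

theorem proc_eq (v : List Int) : procA v = procB v := by
  unfold procA procB
  cases hs : PySem.List.sorted v (fun a => a) false with
  | nil => rfl
  | cons x rest =>
    simp only [List.foldl_cons]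
    have hstep : stepA (x, x, ([] : List (Int × Int)), (1 : Int)) x
        = (x, x, ([] : List (Int × Int)), (2 : Int)) := by
      simp [stepA]
    rw [hstep]
    exact loop_eq rest x x [] 2 [] rfl

-- ===== VERDICT (by name: the statement is the Claim_ definition above) =====
theorem find_intervals_in_variables_spec : Claim_equal_find_intervals_in_variables := by
  intro d _ _
  unfold Spec_find_intervals_in_variables find_intervals_in_variables
    find_intervals_in_variables_alt
  simp [proc_eq]
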